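-- pv_equiv track=rewrite | github.com/bhanutejaindla/leetcode | 3877-minimum-removals-to-achieve-target-xor/3877-minimum-removals-to-achieve-target-xor.py | minRemovals
-- ===== SOURCE A (Python) =====
-- from typing import List
--
-- def minRemovals(nums: List[int], target: int) -> int:
--     n = len(nums)
--
--     dp = {0: 0}   # xor -> max length
--
--     for num in nums:
--         new_dp = dp.copy()
--         for xor_val, length in dp.items():
--             new_xor = xor_val ^ num
--             new_dp[new_xor] = max(new_dp.get(new_xor, 0), length + 1)
--         dp = new_dp
--
--     if target not in dp:
--         return -1
--
--     return n - dp[target]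
-- ===== SOURCE B (Python) =====
-- from typing import List
-- from functools import lru_cache
--
-- def minRemovals(nums: List[int], target: int) -> int:
--     n = len(nums)
--
--     @lru_cache(maxsize=None)
--     def f(i: int, x: int):
--         # max number of elements chosen from nums[i:] so the running xor x ends at target
--         # (None = unreachable)
--         if i == n:
--             return 0 if x == target else None
--         best = f(i + 1, x)
--         take = f(i + 1, x ^ nums[i])
--         if take is not None and (best is None or take + 1 > best):
--             best = take + 1
--         return best
--
--     r = f(0, 0)
--     return -1 if r is None else n - r
-- ===== Notes on version B (the rewrite author's own statement) =====
-- stated objective: alternative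
-- what changed: Replaced the bottom-up reachable-xor dictionary sweep (rebuilding a xor->max-length dict per element) with a top-down memoized recursion f(i, x) on the index returning the maximum number of kept elements whose running xor reaches target (None = unreachable), answer n - f(0, 0).
import Mathlib
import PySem

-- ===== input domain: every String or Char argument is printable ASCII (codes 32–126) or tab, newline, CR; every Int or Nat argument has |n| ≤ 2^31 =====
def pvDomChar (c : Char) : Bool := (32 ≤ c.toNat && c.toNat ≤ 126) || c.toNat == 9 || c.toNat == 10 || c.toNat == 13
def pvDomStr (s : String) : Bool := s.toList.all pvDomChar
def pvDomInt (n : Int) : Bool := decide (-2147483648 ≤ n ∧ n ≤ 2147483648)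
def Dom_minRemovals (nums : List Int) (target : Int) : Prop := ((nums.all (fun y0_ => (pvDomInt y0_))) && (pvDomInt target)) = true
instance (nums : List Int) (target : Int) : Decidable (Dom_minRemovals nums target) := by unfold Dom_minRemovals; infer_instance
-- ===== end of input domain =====

-- B replaces A's bottom-up reachable-xor dict sweep by a top-down recursion on the index
-- (max count of kept elements whose xor reaches target, None = unreachable); objective: alternative decomposition.

-- ===== PORT A =====
-- inner loop: 'for xor_val, length in dp.items(): new_dp[new_xor] = max(new_dp.get(new_xor, 0), length + 1)'
-- starting from new_dp = dp.copy()
def aStep (dp : PySem.Dict Int Int) (num : Int) : PySem.Dict Int Int :=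
  dp.items.foldl
    (fun nd p =>
      nd.insert (PySem.Int.bxor p.1 num)
        (max (nd.getD (PySem.Int.bxor p.1 num) 0) (p.2 + 1)))
    dp

def minRemovals (nums : List Int) (target : Int) : Int :=
  let n : Int := nums.length
  let dp := nums.foldl aStep (PySem.Dict.ofList [((0 : Int), (0 : Int))])
  match dp.get? target with
  | none => -1          -- 'if target not in dp: return -1'
  | some l => n - l     -- 'return n - dp[target]'

-- ===== PORT B =====
-- B's memoized f(i, x) ported as structural recursion on the suffix nums[i:]
-- (lru_cache is a caching detail; the computed value is this recursion)
def bRec (target : Int) : List Int → Int → Option Int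
  | [], x => if x = target then some 0 else none
  | a :: l, x =>
      let best := bRec target l x
      let take := bRec target l (PySem.Int.bxor x a)
      match take, best with
      | none, best => best
      | some t, none => some (t + 1)
      | some t, some b => if t + 1 > b then some (t + 1) else some b

def minRemovals_alt (nums : List Int) (target : Int) : Int :=
  match bRec target nums 0 with
  | none => -1
  | some r => (nums.length : Int) - r

-- ===== PRECONDITION & SPEC =====
def Spec_minRemovals (nums : List Int) (target : Int) (out : Int) : Prop := out = minRemovals_alt nums target
instance (nums : List Int) (target : Int) (out : Int) : Decidable (Spec_minRemovals nums target out) := by unfold Spec_minRemovals; infer_instance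

-- ===== CLAIM (what is proved, stated in full; the proofs are below) =====
def Claim_equal_minRemovals : Prop := ∀ (nums : List Int) (target : Int), Dom_minRemovals nums target → Spec_minRemovals nums target (minRemovals nums target)

-- ===== LEMMAS AND PROOFS =====

-- xor algebra for PySem.Int.bxor
theorem bxor_eq_xor (a b : Int) : PySem.Int.bxor a b = a.xor b := by
  cases a <;> cases b <;>
    simp [PySem.Int.bxor, Int.xor] <;> omega

theorem bxor_assoc (a b c : Int) :
    PySem.Int.bxor (PySem.Int.bxor a b) c = PySem.Int.bxor a (PySem.Int.bxor b c) := by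
  simp only [bxor_eq_xor]
  cases a <;> cases b <;> cases c <;> simp [Int.xor, Nat.xor_assoc]

theorem bxor_cancel (a b : Int) : PySem.Int.bxor (PySem.Int.bxor a b) b = a := by
  rw [bxor_assoc, PySem.Int.bxor_self, PySem.Int.bxor_zero]

theorem bxor_left_inj {a b c : Int} (h : PySem.Int.bxor a c = PySem.Int.bxor b c) : a = b := by
  have h2 := congrArg (fun x => PySem.Int.bxor x c) h
  simpa [bxor_cancel] using h2

-- option-valued max (none = unreachable / -inf)
def omax : Option Int → Option Int → Option Int
  | none, y => y
  | some a, none => some a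
  | some a, some b => some (max a b)

-- the extensional step A performs on the (xor -> max length) table
def gStep (g : Int → Option Int) (a : Int) : Int → Option Int :=
  fun v => omax (g v) ((g (PySem.Int.bxor v a)).map (· + 1))

def g0 : Int → Option Int := fun v => if v = 0 then some 0 else none

def gFold (l : List Int) : Int → Option Int := l.foldr (fun a g => gStep g a) g0

-- values stay nonnegative
def gNN (g : Int → Option Int) : Prop := ∀ v k, g v = some k → 0 ≤ k

theorem gNN_g0 : gNN g0 := by
  intro v k h
  by_cases hv : v = 0 <;> simp [g0, hv] at h
  omega

theorem gNN_gStep {g : Int → Option Int} (h : gNN g) (a : Int) : gNN (gStep g a) := by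
  intro v k hk
  simp only [gStep] at hk
  rcases h1 : g v with _ | m <;> rcases h2 : g (PySem.Int.bxor v a) with _ | t <;>
    rw [h1, h2] at hk <;> simp [omax] at hk
  · have := h _ _ h2; omega
  · exact hk ▸ h _ _ h1
  · have := h _ _ h1; have := h _ _ h2; omega

-- B's combine is omax with the +1 on the 'take' side
theorem combine_eq (o1 o2 : Option Int) :
    (match o1, o2 with
      | none, best => best
      | some t, none => some (t + 1)
      | some t, some b => if t + 1 > b then some (t + 1) else some b) =
    omax o2 (o1.map (· + 1)) := by
  rcases o1 with _ | t <;> rcases o2 with _ | b <;> simp only [omax, Option.map_none, Option.map_some]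
  rcases lt_or_ge b (t + 1) with hb | hb
  · rw [if_pos (by omega), max_eq_right (by omega)]
  · rw [if_neg (by omega), max_eq_left (by omega)]

-- B's recursion computes gFold (shifted by target)
theorem bRec_eq_gFold (target : Int) (l : List Int) (x : Int) :
    bRec target l x = gFold l (PySem.Int.bxor x target) := by
  induction l generalizing x with
  | nil =>
      simp only [bRec, gFold, List.foldr, g0]
      by_cases h : x = target
      · simp [h, PySem.Int.bxor_self]
      · have hne : PySem.Int.bxor x target ≠ 0 := by
          intro h0
          exact h (bxor_left_inj (c := target) (by rw [h0, PySem.Int.bxor_self]))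
        simp [h, hne]
  | cons a l ih =>
      have hx : PySem.Int.bxor (PySem.Int.bxor x a) target
          = PySem.Int.bxor (PySem.Int.bxor x target) a := by
        rw [bxor_assoc, bxor_assoc, PySem.Int.bxor_comm a target]
      simp only [bRec, ih, hx]
      rw [combine_eq]
      rfl

-- gStep is left-commutative, hence the foldl A performs equals the foldr B performs
theorem gStep_comm (g : Int → Option Int) (a b : Int) :
    gStep (gStep g a) b = gStep (gStep g b) a := by
  funext v
  have h1 : PySem.Int.bxor (PySem.Int.bxor v b) a = PySem.Int.bxor (PySem.Int.bxor v a) b := by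
    rw [bxor_assoc, bxor_assoc, PySem.Int.bxor_comm b a]
  simp only [gStep, h1]
  rcases g v with _ | p <;> rcases g (PySem.Int.bxor v a) with _ | q <;>
    rcases g (PySem.Int.bxor v b) with _ | r <;>
    rcases g (PySem.Int.bxor (PySem.Int.bxor v a) b) with _ | s <;>
    simp [omax] <;> omega

theorem foldr_gStep_push (l : List Int) (g : Int → Option Int) (a : Int) :
    l.foldr (fun a g => gStep g a) (gStep g a) = gStep (l.foldr (fun a g => gStep g a) g) a := by
  induction l with
  | nil => rfl
  | cons b l ih => simp only [List.foldr, ih, gStep_comm]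

theorem foldl_gStep_eq_foldr (l : List Int) (g : Int → Option Int) :
    l.foldl gStep g = l.foldr (fun a g => gStep g a) g := by
  induction l generalizing g with
  | nil => rfl
  | cons a l ih => simp only [List.foldl, List.foldr, ih, foldr_gStep_push]

-- ---- the dict side ----

-- the inner item loop, extensionally
theorem inner_loop (num : Int) (L : List (Int × Int)) (nd : PySem.Dict Int Int) (v : Int)
    (hnd : (L.map (fun p => p.1)).Nodup) :
    (L.foldl (fun nd p =>
        nd.insert (PySem.Int.bxor p.1 num)
          (max (nd.getD (PySem.Int.bxor p.1 num) 0) (p.2 + 1))) nd).get? v =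
      (match L.find? (fun p => p.1 == PySem.Int.bxor v num) with
      | some p => some (max (nd.getD v 0) (p.2 + 1))
      | none => nd.get? v) := by
  induction L generalizing nd with
  | nil => rfl
  | cons hd L ih =>
      obtain ⟨k, ln⟩ := hd
      simp only [List.map, List.nodup_cons] at hnd
      obtain ⟨hk, hnd'⟩ := hnd
      by_cases h : k = PySem.Int.bxor v num
      · -- this iteration writes key v; no other does
        have hkey : PySem.Int.bxor k num = v := by rw [h, bxor_cancel]
        have hfind : L.find? (fun p => p.1 == PySem.Int.bxor v num) = none := by
          rw [List.find?_eq_none]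
          intro p hp
          simp only [beq_iff_eq]
          intro hpk
          have hmem : p.1 ∈ L.map (fun p => p.1) := List.mem_map_of_mem hp
          rw [hpk, ← h] at hmem
          exact hk hmem
        have hfp : List.find? (fun p => p.1 == PySem.Int.bxor v num) ((k, ln) :: L)
            = some (k, ln) := List.find?_cons_of_pos (l := L) (by simp [h])
        simp only [List.foldl]
        rw [ih _ hnd', hfind, hfp, hkey, PySem.Dict.get?_insert_self]
      · -- key v untouched here
        have hne : PySem.Int.bxor k num ≠ v := by
          intro h0; exact h (by rw [← h0, bxor_cancel])
        have hpred : ((k, ln).1 == PySem.Int.bxor v num) = false := by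
          simp [h]
        have hfp : List.find? (fun p => p.1 == PySem.Int.bxor v num) ((k, ln) :: L)
            = List.find? (fun p => p.1 == PySem.Int.bxor v num) L :=
          List.find?_cons_of_neg (l := L) (by simp [h])
        simp only [List.foldl]
        rw [ih _ hnd', hfp]
        cases hf : L.find? (fun p => p.1 == PySem.Int.bxor v num) with
        | none => simp [PySem.Dict.get?_insert, Ne.symm hne]
        | some p => simp [PySem.Dict.getD_insert, Ne.symm hne]

-- extensional description of aStep
theorem aStep_get? (d : PySem.Dict Int Int) (hnd : d.keys.Nodup) {g : Int → Option Int}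
    (hg : ∀ v, d.get? v = g v) (hpos : gNN g) (a v : Int) :
    (aStep d a).get? v = gStep g a v := by
  unfold aStep
  rw [inner_loop a d.items d v hnd]
  cases hf : d.items.find? (fun p => p.1 == PySem.Int.bxor v a) with
  | none =>
      have hq : d.get? (PySem.Int.bxor v a) = none := by
        simp only [PySem.Dict.get?, hf, Option.map_none]
      simp only [gStep, ← hg, hq, Option.map_none]
      rcases d.get? v with _ | m <;> rfl
  | some p =>
      have hp1 : p.1 = PySem.Int.bxor v a := by
        have := List.find?_some hf
        simpa using this
      have hq : d.get? (PySem.Int.bxor v a) = some p.2 := by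
        simp only [PySem.Dict.get?, hf, Option.map_some]
      have hp2 : 0 ≤ p.2 := hpos (PySem.Int.bxor v a) p.2 ((hg (PySem.Int.bxor v a)).symm.trans hq)
      simp only [gStep, ← hg, hq, Option.map_some, PySem.Dict.getD_eq_get?_getD]
      rcases hv : d.get? v with _ | m
      · simp only [Option.getD, omax]
        rw [max_eq_right (by omega)]
      · rfl

-- nodup keys survive aStep
theorem aStep_nodup (d : PySem.Dict Int Int) (hnd : d.keys.Nodup) (a : Int) :
    (aStep d a).keys.Nodup :=
  PySem.Dict.nodup_keys_foldl_insert_key d.items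
    (fun p => PySem.Int.bxor p.1 a)
    (fun nd p => max (nd.getD (PySem.Int.bxor p.1 a) 0) (p.2 + 1)) d hnd

-- outer fold
theorem outer_fold (l : List Int) (d : PySem.Dict Int Int) (g : Int → Option Int)
    (hnd : d.keys.Nodup) (hg : ∀ v, d.get? v = g v) (hpos : gNN g) :
    ∀ v, (l.foldl aStep d).get? v = (l.foldl gStep g) v := by
  induction l generalizing d g with
  | nil => exact hg
  | cons a l ih =>
      simp only [List.foldl]
      exact ih (aStep d a) (gStep g a) (aStep_nodup d hnd a)
        (fun v => aStep_get? d hnd hg hpos a v) (gNN_gStep hpos a)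

theorem dp0_get? (v : Int) :
    (PySem.Dict.ofList [((0 : Int), (0 : Int))]).get? v = g0 v := by
  by_cases hv : v = 0 <;>
    simp [PySem.Dict.ofList, PySem.Dict.get?, PySem.Dict.insert, PySem.Dict.update,
      PySem.Dict.empty, PySem.Dict.contains, g0, hv] <;> omega

theorem dp0_nodup : (PySem.Dict.ofList [((0 : Int), (0 : Int))]).keys.Nodup := by decide

-- ===== VERDICT (by name: the statement is the Claim_ definition above) =====
theorem minRemovals_spec : Claim_equal_minRemovals := by
  intro nums target _
  unfold Spec_minRemovals minRemovals minRemovals_alt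
  have hmain : (nums.foldl aStep (PySem.Dict.ofList [((0 : Int), (0 : Int))])).get? target
      = bRec target nums 0 := by
    rw [outer_fold nums _ g0 dp0_nodup dp0_get? gNN_g0 target, foldl_gStep_eq_foldr,
      bRec_eq_gFold]
    have h0 : PySem.Int.bxor 0 target = target := by
      rw [PySem.Int.bxor_comm, PySem.Int.bxor_zero]
    rw [h0]; rfl
  simp only [hmain]
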